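-- pv_equiv track=rewrite | github.com/yannicksuter/faceter | svg/Path.py | splitDescription
-- ===== SOURCE A (Python) =====
-- def splitDescription(path_description):
--     ext_description = ''
--     for c in path_description:
--         prev_c = ext_description[-1:]
--         if c.isalpha():
--             if prev_c != ' ' and len(prev_c) != 0:
--                 ext_description += f' '
--             ext_description += f'{c} '
--         elif c == '-':
--             if prev_c != ' ' and len(prev_c) != 0:
--                 ext_description += f' '
--             ext_description += f'{c}'
--         elif c == ',' or c == ' ':
--             if prev_c != ' ' and len(prev_c) != 0:
--                 ext_description += f' '
--         else:
--             ext_description += c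
--     return ext_description.strip().split(' ')
-- ===== SOURCE B (Python) =====
-- def splitDescription(path_description):
--     def repl(c):
--         if c.isalpha():
--             return f' {c} '
--         if c == '-':
--             return ' -'
--         if c == ',' or c == ' ':
--             return ' '
--         return c
--     expanded = ''.join(map(repl, path_description))
--     # collapse runs of spaces (and drop leading ones; strip() removes them anyway)
--     collapsed = ''.join(c for c, p in zip(expanded, ' ' + expanded)
--                         if c != ' ' or p != ' ')
--     return collapsed.strip().split(' ')
-- ===== Notes on version B (the rewrite author's own statement) =====
-- stated objective: simpler
-- what changed: Replaced A's stateful char-by-char builder, which re-inspects the last emitted character at every step to decide whether to insert a separator, by a context-free per-character expansion (map+join) followed by one independent space-collapsing pass, then the same strip/split.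
import Mathlib
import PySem

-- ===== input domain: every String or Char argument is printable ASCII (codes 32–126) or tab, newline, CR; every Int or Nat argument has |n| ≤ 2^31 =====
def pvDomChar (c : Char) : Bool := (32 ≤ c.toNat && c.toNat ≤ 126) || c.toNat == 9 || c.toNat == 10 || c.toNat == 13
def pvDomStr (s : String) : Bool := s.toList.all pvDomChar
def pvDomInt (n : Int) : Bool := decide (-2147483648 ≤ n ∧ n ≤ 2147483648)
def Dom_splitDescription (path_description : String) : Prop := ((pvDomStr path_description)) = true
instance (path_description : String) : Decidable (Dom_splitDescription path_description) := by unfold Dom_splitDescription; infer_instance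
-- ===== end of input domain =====

-- B replaces A's stateful character-by-character builder (which inspects the last char
-- already emitted) by a context-free per-char expansion followed by one space-collapsing
-- pass — a plainer decomposition (objective: simpler); same return value on all inputs.

-- ===== PORT A =====
-- one iteration of A's for-loop: ext_description is the accumulated string (as List Char)
def pvStepA (ext : List Char) (c : Char) : List Char :=
  let prev_c := PySem.List.slice ext (some (-1)) none    -- ext_description[-1:]
  if PySem.Chars.isalpha c then
    (if prev_c ≠ [' '] ∧ prev_c.length ≠ 0 then ext ++ [' '] else ext) ++ [c, ' ']
  else if c = '-' then
    (if prev_c ≠ [' '] ∧ prev_c.length ≠ 0 then ext ++ [' '] else ext) ++ [c]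
  else if c = ',' ∨ c = ' ' then
    (if prev_c ≠ [' '] ∧ prev_c.length ≠ 0 then ext ++ [' '] else ext)
  else ext ++ [c]

def splitDescription (path_description : String) : List String :=
  let ext := path_description.toList.foldl pvStepA []
  (PySem.Chars.splitOn (PySem.Chars.strip ext) [' ']).map String.ofList

-- ===== PORT B =====
-- Source B's repl: context-free replacement for one character
def pvRepl (c : Char) : List Char :=
  if PySem.Chars.isalpha c then [' ', c, ' ']
  else if c = '-' then [' ', '-']
  else if c = ',' ∨ c = ' ' then [' ']
  else [c]

def splitDescription_alt (path_description : String) : List String :=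
  let expanded := path_description.toList.flatMap pvRepl
  -- Source B: keep c unless it is a space preceded by a space (sentinel ' ' in front)
  let collapsed := ((expanded.zip (' ' :: expanded)).filter
      (fun cp => cp.1 != ' ' || cp.2 != ' ')).map Prod.fst
  (PySem.Chars.splitOn (PySem.Chars.strip collapsed) [' ']).map String.ofList

-- ===== PRECONDITION & SPEC =====
def Spec_splitDescription (path_description : String) (out : List String) : Prop := out = splitDescription_alt path_description
instance (path_description : String) (out : List String) : Decidable (Spec_splitDescription path_description out) := by unfold Spec_splitDescription; infer_instance

-- ===== CLAIM (what is proved, stated in full; the proofs are below) =====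
def Claim_equal_splitDescription : Prop := ∀ (path_description : String), Dom_splitDescription path_description → Spec_splitDescription path_description (splitDescription path_description)

-- ===== LEMMAS AND PROOFS =====

-- collapseF b l: l with runs of spaces collapsed; b = "a space was just emitted/assumed"
def collapseF (b : Bool) : List Char → List Char
  | [] => []
  | c :: t =>
    if c = ' ' then (if b then collapseF true t else ' ' :: collapseF true t)
    else c :: collapseF false t

-- B's zip/filter pass computes collapseF
theorem zipFilter_eq_collapseF (l : List Char) (p : Char) :
    ((l.zip (p :: l)).filter (fun cp => cp.1 != ' ' || cp.2 != ' ')).map Prod.fst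
      = collapseF (p == ' ') l := by
  induction l generalizing p with
  | nil => rfl
  | cons c t ih =>
    simp only [List.zip_cons_cons, List.filter_cons, collapseF]
    by_cases hc : c = ' ' <;> by_cases hp : p = ' ' <;>
      simp [hc, hp, ih, beq_eq_false_iff_ne.mpr]

theorem slice_neg_one_append (l : List Char) (c : Char) :
    PySem.List.slice (l ++ [c]) (some (-1)) none = [c] := by
  simp [PySem.List.slice]

theorem isalpha_ne_space {c : Char} (h : PySem.Chars.isalpha c = true) : c ≠ ' ' := by
  intro hc; subst hc; exact absurd h (by decide)

-- main invariant: A's loop, started on a non-empty accumulator ext ++ [c0], appends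
-- exactly the collapsed expansion of the remaining input
theorem foldA_append (s : List Char) : ∀ (ext : List Char) (c0 : Char),
    (s.foldl pvStepA (ext ++ [c0])) = (ext ++ [c0]) ++ collapseF (c0 == ' ') (s.flatMap pvRepl) := by
  induction s with
  | nil => intro ext c0; simp [collapseF]
  | cons c cs ih =>
    intro ext c0
    simp only [List.foldl_cons, List.flatMap_cons]
    by_cases ha : PySem.Chars.isalpha c
    · have hcs : c ≠ ' ' := isalpha_ne_space ha
      by_cases h0 : c0 = ' '
      · subst h0
        have : pvStepA (ext ++ [' ']) c = (ext ++ [' ']) ++ [c, ' '] := by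
          simp [pvStepA, slice_neg_one_append, ha]
        rw [this]
        have := ih (ext ++ [' '] ++ [c]) ' '
        simp only [List.append_assoc, List.cons_append, List.nil_append] at this ⊢
        rw [this]
        simp [pvRepl, collapseF, ha, hcs]
      · have : pvStepA (ext ++ [c0]) c = (ext ++ [c0]) ++ [' ', c, ' '] := by
          simp [pvStepA, slice_neg_one_append, ha, h0]
        rw [this]
        have := ih (ext ++ [c0] ++ [' ', c]) ' '
        simp only [List.append_assoc, List.cons_append, List.nil_append] at this ⊢
        rw [this]
        simp [pvRepl, collapseF, ha, hcs, h0]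
    · by_cases hm : c = '-'
      · subst hm
        by_cases h0 : c0 = ' '
        · subst h0
          have : pvStepA (ext ++ [' ']) '-' = (ext ++ [' ']) ++ ['-'] := by
            simp [pvStepA, slice_neg_one_append, ha]
          rw [this]
          have := ih (ext ++ [' ']) '-'
          simp only [List.append_assoc, List.cons_append, List.nil_append] at this ⊢
          rw [this]
          simp [pvRepl, collapseF, ha]
        · have : pvStepA (ext ++ [c0]) '-' = (ext ++ [c0]) ++ [' ', '-'] := by
            simp [pvStepA, slice_neg_one_append, ha, h0]
          rw [this]
          have := ih (ext ++ [c0] ++ [' ']) '-'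
          simp only [List.append_assoc, List.cons_append, List.nil_append] at this ⊢
          rw [this]
          simp [pvRepl, collapseF, ha, h0]
      · by_cases hs : c = ',' ∨ c = ' '
        · by_cases h0 : c0 = ' '
          · subst h0
            have : pvStepA (ext ++ [' ']) c = (ext ++ [' ']) := by
              simp [pvStepA, slice_neg_one_append, ha, hm, hs]
            rw [this]
            rw [ih ext ' ']
            simp [pvRepl, collapseF, ha, hm, hs]
          · have : pvStepA (ext ++ [c0]) c = (ext ++ [c0]) ++ [' '] := by
              simp [pvStepA, slice_neg_one_append, ha, hm, hs, h0]
            rw [this]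
            have := ih (ext ++ [c0]) ' '
            simp only [List.append_assoc, List.cons_append, List.nil_append] at this ⊢
            rw [this]
            simp [pvRepl, collapseF, ha, hm, hs, h0]
        · obtain ⟨hc1, hc2⟩ := not_or.mp hs
          have hb : (c == ' ') = false := beq_eq_false_iff_ne.mpr hc2
          have : pvStepA (ext ++ [c0]) c = (ext ++ [c0]) ++ [c] := by
            simp [pvStepA, ha, hm, hs]
          rw [this]
          have := ih (ext ++ [c0]) c
          simp only [List.append_assoc, List.cons_append, List.nil_append] at this ⊢
          rw [this]
          simp [pvRepl, collapseF, ha, hm, hc1, hc2, hb]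

theorem foldA_nil (s : List Char) :
    s.foldl pvStepA [] = collapseF true (s.flatMap pvRepl) := by
  induction s with
  | nil => rfl
  | cons c cs ih =>
    simp only [List.foldl_cons, List.flatMap_cons]
    by_cases ha : PySem.Chars.isalpha c
    · have hcs : c ≠ ' ' := isalpha_ne_space ha
      have : pvStepA [] c = [c, ' '] := by simp [pvStepA, PySem.List.slice, ha]
      rw [this]
      have := foldA_append cs [c] ' '
      simp only [List.cons_append, List.nil_append] at this
      rw [this]
      simp [pvRepl, collapseF, ha, hcs]
    · by_cases hm : c = '-'
      · subst hm
        have : pvStepA [] '-' = ['-'] := by simp [pvStepA, PySem.List.slice, ha]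
        rw [this]
        have := foldA_append cs [] '-'
        simp only [List.nil_append] at this
        rw [this]
        simp [pvRepl, collapseF, ha]
      · by_cases hs : c = ',' ∨ c = ' '
        · have : pvStepA [] c = [] := by simp [pvStepA, PySem.List.slice, ha, hm, hs]
          rw [this, ih]
          simp [pvRepl, collapseF, ha, hm, hs]
        · obtain ⟨hc1, hc2⟩ := not_or.mp hs
          have hb : (c == ' ') = false := beq_eq_false_iff_ne.mpr hc2
          have : pvStepA [] c = [c] := by simp [pvStepA, ha, hm, hs]
          rw [this]
          have := foldA_append cs [] c
          simp only [List.nil_append] at this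
          rw [this]
          simp [pvRepl, collapseF, ha, hm, hc1, hc2, hb]

-- ===== VERDICT (by name: the statement is the Claim_ definition above) =====
theorem splitDescription_spec : Claim_equal_splitDescription := by
  intro pd _
  unfold Spec_splitDescription splitDescription splitDescription_alt
  simp only [zipFilter_eq_collapseF, foldA_nil]
  rfl
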